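-- pv_equiv track=rewrite | github.com/talkad/OMPify | database_creator/parsers/HPCorpus_parser/parse_tools.py | replace_vars
-- ===== SOURCE A (Python) =====
-- def count_newlines(code):
--     counter = 0
--
--     for letter in code:
--         if letter == '\n':
--             counter += 1
--             continue
--
--         return counter
--
--     return counter
--
-- def replace_vars(code, var_mapping):
--     '''
--         Create replaced representation
--     '''
--     updated_code = ''
--     prev_idx = 0
--     offset = count_newlines(code)
--     updated_mappings = []
--     var_offset = 0
--
--     for old_var, new_var, start, end in var_mapping:
--         updated_mappings.append((new_var, old_var, start-offset+var_offset, start-offset+var_offset+len(new_var)))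
--         var_offset += len(new_var)-len(old_var)
--         updated_code += code[prev_idx:start-offset] + new_var
--         prev_idx = end - offset
--
--     updated_code += code[prev_idx:]
--
--     return updated_code, updated_mappings
--
-- code = '''
-- type_591 func_466() {
--     type_591 arr_448[num_589 + num_992];
--     type_591 var_15, var_561;
--     type_591 var_567, var_518;
--     type_591 var_782 = num_699;
--
--     for (var_15 = num_699; var_15 < num_589; var_15++) {
--         arr_448[var_15] = num_174;
--     }
--
--     for (var_561 = num_589; var_561 > num_699; var_561 -= num_917) {
--         var_518 = num_699;
--
--         var_15 = var_561;
--         for (;;) {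
--             var_518 += arr_448[var_15] * num_948;
--             var_567 = num_146 * var_15 - num_992;
--
--             arr_448[var_15] = var_518 % var_567;
--             var_518 /= var_567;
--             var_15--;
--             if (var_15 == num_699) break;
--             var_518 *= var_15;
--         }
--         func_725(str_237, var_782 + var_518 / num_948);
--         var_782 = var_518 % num_948;
--     }
--
--     return num_699;
-- }
--
-- '''
-- ===== SOURCE B (Python) =====
-- def count_newlines(code):
--     counter = 0
--
--     for letter in code:
--         if letter == '\n':
--             counter += 1
--             continue
--
--         return counter
--
--     return counter
--
-- def _build_code(code, var_mapping, prev_idx, offset):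
--     if not var_mapping:
--         return code[prev_idx:]
--     _, new_var, start, end = var_mapping[0]
--     return code[prev_idx:start-offset] + new_var + _build_code(code, var_mapping[1:], end-offset, offset)
--
-- def _build_mappings(var_mapping, offset, var_offset):
--     if not var_mapping:
--         return []
--     old_var, new_var, start, _ = var_mapping[0]
--     pos = start - offset + var_offset
--     return [(new_var, old_var, pos, pos + len(new_var))] + \
--         _build_mappings(var_mapping[1:], offset, var_offset + len(new_var) - len(old_var))
--
-- def replace_vars(code, var_mapping):
--     '''
--         Create replaced representation
--     '''
--     offset = count_newlines(code)
--     return _build_code(code, var_mapping, 0, offset), _build_mappings(var_mapping, offset, 0)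
-- ===== Notes on version B (the rewrite author's own statement) =====
-- stated objective: alternative
-- what changed: A's single imperative loop that interleaves string accumulation and mapping bookkeeping is split into two independent structural recursions: one rebuilds the code from slices, the other computes the shifted mappings with a running offset.
import Mathlib
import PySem

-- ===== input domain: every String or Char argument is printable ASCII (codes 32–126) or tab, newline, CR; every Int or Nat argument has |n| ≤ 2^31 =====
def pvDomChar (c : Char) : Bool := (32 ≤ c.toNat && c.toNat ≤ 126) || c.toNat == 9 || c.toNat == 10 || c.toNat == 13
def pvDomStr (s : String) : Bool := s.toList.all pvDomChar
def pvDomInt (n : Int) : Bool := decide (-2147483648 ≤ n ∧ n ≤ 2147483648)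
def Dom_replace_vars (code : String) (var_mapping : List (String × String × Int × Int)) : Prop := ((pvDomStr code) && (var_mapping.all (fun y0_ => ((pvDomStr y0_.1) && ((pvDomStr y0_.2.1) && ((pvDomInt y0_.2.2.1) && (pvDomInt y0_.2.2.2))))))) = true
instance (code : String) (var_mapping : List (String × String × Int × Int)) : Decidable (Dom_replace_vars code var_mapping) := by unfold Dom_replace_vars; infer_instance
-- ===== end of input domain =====

-- B replaces A's single loop that interleaves code rebuilding and mapping bookkeeping
-- with two independent structural recursions (one for the code, one for the mappings);
-- objective: alternative decomposition, same cost.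

-- ===== PORT A =====
-- the for/continue/early-return loop of count_newlines
def count_newlines_loop (counter : Int) : List Char → Int
  | [] => counter
  | c :: rest => if c = '\n' then count_newlines_loop (counter + 1) rest else counter

def count_newlines (code : String) : Int := count_newlines_loop 0 code.toList

def replace_vars (code : String) (var_mapping : List (String × String × Int × Int)) : String × (List (String × String × Int × Int)) :=
  let offset := count_newlines code
  let cs := code.toList
  -- state: (updated_code, prev_idx, updated_mappings, var_offset)
  let st := var_mapping.foldl
    (fun (st : List Char × Int × List (String × String × Int × Int) × Int) entry =>
      let (old_var, new_var, start, stop) := entry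
      let (uc, prev, ms, vo) := st
      (uc ++ PySem.List.slice cs (some prev) (some (start - offset)) ++ new_var.toList,
       stop - offset,
       ms ++ [(new_var, old_var, start - offset + vo, start - offset + vo + PySem.Str.len new_var)],
       vo + (PySem.Str.len new_var - PySem.Str.len old_var)))
    ([], 0, [], 0)
  (String.ofList (st.1 ++ PySem.List.slice cs (some st.2.1) none), st.2.2.1)

-- ===== PORT B =====
def count_newlines_b_loop (counter : Int) : List Char → Int
  | [] => counter
  | c :: rest => if c = '\n' then count_newlines_b_loop (counter + 1) rest else counter

def count_newlines_b (code : String) : Int := count_newlines_b_loop 0 code.toList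

-- _build_code of Source B
def build_code (cs : List Char) (prev offset : Int) : List (String × String × Int × Int) → List Char
  | [] => PySem.List.slice cs (some prev) none
  | (_, new_var, start, stop) :: rest =>
      PySem.List.slice cs (some prev) (some (start - offset)) ++ new_var.toList
        ++ build_code cs (stop - offset) offset rest

-- _build_mappings of Source B
def build_mappings (offset var_offset : Int) : List (String × String × Int × Int) → List (String × String × Int × Int)
  | [] => []
  | (old_var, new_var, start, _) :: rest =>
      let pos := start - offset + var_offset
      (new_var, old_var, pos, pos + PySem.Str.len new_var)
        :: build_mappings offset (var_offset + (PySem.Str.len new_var - PySem.Str.len old_var)) rest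

def replace_vars_alt (code : String) (var_mapping : List (String × String × Int × Int)) : String × (List (String × String × Int × Int)) :=
  let offset := count_newlines_b code
  (String.ofList (build_code code.toList 0 offset var_mapping), build_mappings offset 0 var_mapping)

-- ===== PRECONDITION & SPEC =====
def Spec_replace_vars (code : String) (var_mapping : List (String × String × Int × Int)) (out : String × (List (String × String × Int × Int))) : Prop := out = replace_vars_alt code var_mapping
instance (code : String) (var_mapping : List (String × String × Int × Int)) (out : String × (List (String × String × Int × Int))) : Decidable (Spec_replace_vars code var_mapping out) := by unfold Spec_replace_vars; infer_instance

-- ===== CLAIM (what is proved, stated in full; the proofs are below) =====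
def Claim_equal_replace_vars : Prop := ∀ (code : String) (var_mapping : List (String × String × Int × Int)), Dom_replace_vars code var_mapping → Spec_replace_vars code var_mapping (replace_vars code var_mapping)

-- ===== LEMMAS AND PROOFS =====
theorem count_newlines_b_loop_eq (counter : Int) (cs : List Char) :
    count_newlines_b_loop counter cs = count_newlines_loop counter cs := by
  induction cs generalizing counter with
  | nil => rfl
  | cons c rest ih =>
      simp only [count_newlines_loop, count_newlines_b_loop]
      split_ifs with h
      · exact ih _
      · rfl

-- invariant of A's single loop: it accumulates exactly B's two recursions
theorem loopA_eq (cs : List Char) (offset : Int)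
    (vm : List (String × String × Int × Int)) :
    ∀ (acc : List Char) (prev : Int) (ms : List (String × String × Int × Int)) (vo : Int),
    (let st := vm.foldl
        (fun (st : List Char × Int × List (String × String × Int × Int) × Int) entry =>
          let (old_var, new_var, start, stop) := entry
          let (uc, prev, ms, vo) := st
          (uc ++ PySem.List.slice cs (some prev) (some (start - offset)) ++ new_var.toList,
           stop - offset,
           ms ++ [(new_var, old_var, start - offset + vo, start - offset + vo + PySem.Str.len new_var)],
           vo + (PySem.Str.len new_var - PySem.Str.len old_var)))
        (acc, prev, ms, vo);
      st.1 ++ PySem.List.slice cs (some st.2.1) none = acc ++ build_code cs prev offset vm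
        ∧ st.2.2.1 = ms ++ build_mappings offset vo vm) := by
  induction vm with
  | nil => intro acc prev ms vo; simp [build_code, build_mappings]
  | cons e rest ih =>
      intro acc prev ms vo
      obtain ⟨old_var, new_var, start, stop⟩ := e
      have h := ih (acc ++ PySem.List.slice cs (some prev) (some (start - offset)) ++ new_var.toList)
        (stop - offset)
        (ms ++ [(new_var, old_var, start - offset + vo, start - offset + vo + PySem.Str.len new_var)])
        (vo + (PySem.Str.len new_var - PySem.Str.len old_var))
      simp only [List.foldl_cons]
      refine ⟨?_, ?_⟩
      · rw [h.1]; simp [build_code]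
      · rw [h.2]; simp [build_mappings]

-- ===== VERDICT (by name: the statement is the Claim_ definition above) =====
theorem replace_vars_spec : Claim_equal_replace_vars := by
  intro code vm _
  unfold Spec_replace_vars replace_vars replace_vars_alt count_newlines_b count_newlines
  rw [count_newlines_b_loop_eq]
  have h := loopA_eq code.toList (count_newlines_loop 0 code.toList) vm [] 0 [] 0
  simp only at h ⊢
  rw [h.1, h.2]
  simp
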